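-- pv_equiv track=rewrite | github.com/Marcel-Haag/Algorithms | Complex/HigherSort/radixSort.py | radixSortForNames
-- ===== SOURCE A (Python) =====
-- def mergeSort(list: []):
--     if len(list) <= 1: return list
--
--     pivot = len(list) // 2
--     L = list[:pivot]
--     R = list[pivot:]
--
--     mergeSort(L)
--     mergeSort(R)
--
--     i = j = k = 0
--
--     while i < len(L) and j < len(R):
--         if L[i] < R[j]:
--             list[k] = L[i]
--             i += 1
--         else:
--             list[k] = R[j]
--             j += 1
--         k += 1
--
--     while i < len(L):
--         list[k] = L[i]
--         i += 1
--         k += 1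
--
--     while j < len(R):
--         list[k] = R[j]
--         j += 1
--         k += 1
--
--     return list
--
-- def radixSortForNames(list: []):
--     LetterBoxA = []
--     LetterBoxL = []
--     LetterBoxM = []
--     LetterBoxN = []
--     LetterBoxP = []
--     LetterBoxS = []
--
--     for e in list:
--         firstChar = str(e[0])
--         if firstChar == 'A': LetterBoxA.append(e)
--         if firstChar == 'L': LetterBoxL.append(e)
--         if firstChar == 'M': LetterBoxM.append(e)
--         if firstChar == 'N': LetterBoxN.append(e)
--         if firstChar == 'P': LetterBoxP.append(e)
--         if firstChar == 'S': LetterBoxS.append(e)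
--
--     result = []
--     result.extend(mergeSort(LetterBoxA))
--     result.extend(mergeSort(LetterBoxL))
--     result.extend(mergeSort(LetterBoxM))
--     result.extend(mergeSort(LetterBoxN))
--     result.extend(mergeSort(LetterBoxP))
--     result.extend(mergeSort(LetterBoxS))
--
--     return result
-- ===== SOURCE B (Python) =====
-- def radixSortForNames(list):
--     return sorted(e for e in list if e[0] in {'A', 'L', 'M', 'N', 'P', 'S'})
-- ===== Notes on version B (the rewrite author's own statement) =====
-- stated objective: simpler
-- what changed: A partitions into six per-letter boxes and mergesorts each with a hand-written mergesort; B filters once on the first character and sorts the filtered list with a single sorted() call, since the box letters are in alphabetical order and the first character dominates string comparison.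
import Mathlib
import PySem

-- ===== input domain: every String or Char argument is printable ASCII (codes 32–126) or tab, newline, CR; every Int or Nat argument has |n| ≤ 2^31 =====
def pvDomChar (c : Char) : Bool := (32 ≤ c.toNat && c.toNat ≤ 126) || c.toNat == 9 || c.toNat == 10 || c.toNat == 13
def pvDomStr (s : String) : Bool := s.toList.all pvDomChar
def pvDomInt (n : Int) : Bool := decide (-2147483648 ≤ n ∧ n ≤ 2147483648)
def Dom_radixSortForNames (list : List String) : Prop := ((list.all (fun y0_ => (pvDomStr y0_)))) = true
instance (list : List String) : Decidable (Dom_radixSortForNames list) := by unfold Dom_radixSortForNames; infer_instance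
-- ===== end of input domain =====

-- B replaces A's six letter boxes plus a hand-written mergesort of each box by one filter
-- pass and a single sort (objective: simpler; the boxes come in alphabetical order and the
-- first character dominates string comparison, so sorting the filtered list once is the same).

-- ===== PORT A =====

-- first character e[0] as a Char; Python raises IndexError on "", which Pre_ excludes
-- (the default ' ' is not one of the six letters, so the port drops an empty string).
def pvFirstChar (e : String) : Char := (PySem.Str.pyGet? e 0).getD ' '

-- the merge phase of mergeSort (the three while loops writing back into `list`)
def pvMerge : List String → List String → List String
  | [], r => r
  | a :: l, [] => a :: l
  | a :: l, b :: r => if a < b then a :: pvMerge l (b :: r) else b :: pvMerge (a :: l) r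

-- mergeSort: Python sorts the slices L and R in place (by the recursive calls) and merges them
def pvMergeSort (l : List String) : List String :=
  if h : l.length ≤ 1 then l
  else pvMerge (pvMergeSort (l.take (l.length / 2))) (pvMergeSort (l.drop (l.length / 2)))
termination_by l.length
decreasing_by
  · simp; omega
  · simp; omega

-- the single for-loop filling the six letter boxes (one 6-tuple of accumulators)
def pvBoxes (list : List String) :
    List String × List String × List String × List String × List String × List String :=
  list.foldl (fun bx e =>
    let c := pvFirstChar e
    ((if c = 'A' then bx.1 ++ [e] else bx.1),
     (if c = 'L' then bx.2.1 ++ [e] else bx.2.1),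
     (if c = 'M' then bx.2.2.1 ++ [e] else bx.2.2.1),
     (if c = 'N' then bx.2.2.2.1 ++ [e] else bx.2.2.2.1),
     (if c = 'P' then bx.2.2.2.2.1 ++ [e] else bx.2.2.2.2.1),
     (if c = 'S' then bx.2.2.2.2.2 ++ [e] else bx.2.2.2.2.2)))
    ([], [], [], [], [], [])

def radixSortForNames (list : List String) : List String :=
  let bx := pvBoxes list
  pvMergeSort bx.1 ++ pvMergeSort bx.2.1 ++ pvMergeSort bx.2.2.1 ++
    pvMergeSort bx.2.2.2.1 ++ pvMergeSort bx.2.2.2.2.1 ++ pvMergeSort bx.2.2.2.2.2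

-- ===== PORT B =====

-- Source B: sorted(e for e in list if e[0] in {'A','L','M','N','P','S'})
def radixSortForNames_alt (list : List String) : List String :=
  PySem.List.sorted
    (list.filter (fun e => decide (pvFirstChar e ∈ (['A', 'L', 'M', 'N', 'P', 'S'] : List Char))))
    (fun x => x) false

-- ===== PRECONDITION & SPEC =====
-- Pre_ excludes lists containing the empty string, on which Python A (and B) raise IndexError at e[0].
def Pre_radixSortForNames (list : List String) : Prop := ∀ s ∈ list, s ≠ ""
instance (list : List String) : Decidable (Pre_radixSortForNames list) := by
  unfold Pre_radixSortForNames; infer_instance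

def pvWitness_radixSortForNames : List String := ["Sara", "Anna", "Bob", "Ann", "Paul"]

def Spec_radixSortForNames (list : List String) (out : List String) : Prop := out = radixSortForNames_alt list
instance (list : List String) (out : List String) : Decidable (Spec_radixSortForNames list out) := by unfold Spec_radixSortForNames; infer_instance

-- ===== CLAIM (what is proved, stated in full; the proofs are below) =====
def Claim_equal_radixSortForNames : Prop := ∀ (list : List String), Dom_radixSortForNames list → Pre_radixSortForNames list → Spec_radixSortForNames list (radixSortForNames list)

-- ===== LEMMAS AND PROOFS =====

theorem pvMerge_perm (l r : List String) : (pvMerge l r).Perm (l ++ r) := by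
  fun_induction pvMerge with
  | case1 r => simp
  | case2 a l => simp
  | case3 a l b r hab ih => exact ih.cons a
  | case4 a l b r hab ih =>
    exact (ih.cons b).trans
      ((List.Perm.swap a b (l ++ r)).trans ((List.perm_middle (a := b) (l₁ := l)).symm.cons a)).symm.symm

theorem pvMerge_pairwise (l r : List String)
    (hl : l.Pairwise (· ≤ ·)) (hr : r.Pairwise (· ≤ ·)) :
    (pvMerge l r).Pairwise (· ≤ ·) := by
  fun_induction pvMerge with
  | case1 r => exact hr
  | case2 a l => exact hl
  | case3 a l b r hab ih =>
    rw [List.pairwise_cons] at hl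
    refine List.pairwise_cons.mpr ⟨?_, ih hl.2 hr⟩
    intro y hy
    have hmem := (pvMerge_perm l (b :: r)).mem_iff.mp hy
    rw [List.pairwise_cons] at hr
    rcases List.mem_append.mp hmem with h | h
    · exact hl.1 y h
    · rcases List.mem_cons.mp h with rfl | h
      · exact le_of_lt hab
      · exact le_of_lt (lt_of_lt_of_le hab (hr.1 y h))
  | case4 a l b r hab ih =>
    rw [List.pairwise_cons] at hr
    rw [not_lt] at hab
    refine List.pairwise_cons.mpr ⟨?_, ih hl hr.2⟩
    intro y hy
    have hmem := (pvMerge_perm (a :: l) r).mem_iff.mp hy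
    rw [List.pairwise_cons] at hl
    rcases List.mem_append.mp hmem with h | h
    · rcases List.mem_cons.mp h with rfl | h
      · exact hab
      · exact le_trans hab (hl.1 y h)
    · exact hr.1 y h

theorem pvMergeSort_perm (l : List String) : (pvMergeSort l).Perm l := by
  fun_induction pvMergeSort with
  | case1 l h => exact List.Perm.refl l
  | case2 l h ih1 ih2 =>
    exact ((pvMerge_perm _ _).trans (ih1.append ih2)).trans (by rw [List.take_append_drop])

theorem pvMergeSort_pairwise (l : List String) : (pvMergeSort l).Pairwise (· ≤ ·) := by
  fun_induction pvMergeSort with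
  | case1 l h =>
    match l, h with
    | [], _ => exact List.Pairwise.nil
    | [x], _ => simp
  | case2 l h ih1 ih2 => exact pvMerge_pairwise _ _ ih1 ih2

-- the letter-box loop computes the six per-letter filters of the list
theorem pvBoxes_aux (list : List String) (b1 b2 b3 b4 b5 b6 : List String) :
    list.foldl (fun bx e =>
      let c := pvFirstChar e
      ((if c = 'A' then bx.1 ++ [e] else bx.1),
       (if c = 'L' then bx.2.1 ++ [e] else bx.2.1),
       (if c = 'M' then bx.2.2.1 ++ [e] else bx.2.2.1),
       (if c = 'N' then bx.2.2.2.1 ++ [e] else bx.2.2.2.1),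
       (if c = 'P' then bx.2.2.2.2.1 ++ [e] else bx.2.2.2.2.1),
       (if c = 'S' then bx.2.2.2.2.2 ++ [e] else bx.2.2.2.2.2)))
      (b1, b2, b3, b4, b5, b6) =
      (b1 ++ list.filter (fun e => pvFirstChar e = 'A'),
       b2 ++ list.filter (fun e => pvFirstChar e = 'L'),
       b3 ++ list.filter (fun e => pvFirstChar e = 'M'),
       b4 ++ list.filter (fun e => pvFirstChar e = 'N'),
       b5 ++ list.filter (fun e => pvFirstChar e = 'P'),
       b6 ++ list.filter (fun e => pvFirstChar e = 'S')) := by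
  induction list generalizing b1 b2 b3 b4 b5 b6 with
  | nil => simp
  | cons e l ih =>
    simp only [List.foldl_cons]
    rw [ih]
    simp only [List.filter_cons, Prod.mk.injEq]
    refine ⟨?_, ?_, ?_, ?_, ?_, ?_⟩ <;>
      [by_cases h : pvFirstChar e = 'A';
       by_cases h : pvFirstChar e = 'L';
       by_cases h : pvFirstChar e = 'M';
       by_cases h : pvFirstChar e = 'N';
       by_cases h : pvFirstChar e = 'P';
       by_cases h : pvFirstChar e = 'S'] <;>
      simp [h]

theorem pvBoxes_eq (list : List String) :
    pvBoxes list =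
      (list.filter (fun e => pvFirstChar e = 'A'),
       list.filter (fun e => pvFirstChar e = 'L'),
       list.filter (fun e => pvFirstChar e = 'M'),
       list.filter (fun e => pvFirstChar e = 'N'),
       list.filter (fun e => pvFirstChar e = 'P'),
       list.filter (fun e => pvFirstChar e = 'S')) := by
  simpa using pvBoxes_aux list [] [] [] [] [] []

theorem count_filter_eq (x : String) (p : String → Bool) (l : List String) :
    List.count x (l.filter p) = if p x then List.count x l else 0 := by
  induction l with
  | nil => simp
  | cons a l ih => by_cases hpa : p a <;> by_cases hax : a = x <;> simp_all

-- concatenated letter boxes are a permutation of B's single filter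
theorem pvBuckets_perm (list : List String) :
    (list.filter (fun e => pvFirstChar e = 'A') ++
     list.filter (fun e => pvFirstChar e = 'L') ++
     list.filter (fun e => pvFirstChar e = 'M') ++
     list.filter (fun e => pvFirstChar e = 'N') ++
     list.filter (fun e => pvFirstChar e = 'P') ++
     list.filter (fun e => pvFirstChar e = 'S')).Perm
      (list.filter (fun e => decide (pvFirstChar e ∈ (['A', 'L', 'M', 'N', 'P', 'S'] : List Char)))) := by
  refine List.perm_iff_count.mpr fun x => ?_
  simp only [List.count_append, count_filter_eq]
  by_cases hA : pvFirstChar x = 'A'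
  · simp [hA]
  by_cases hL : pvFirstChar x = 'L'
  · simp [hL]
  by_cases hM : pvFirstChar x = 'M'
  · simp [hM]
  by_cases hN : pvFirstChar x = 'N'
  · simp [hN]
  by_cases hP : pvFirstChar x = 'P'
  · simp [hP]
  by_cases hS : pvFirstChar x = 'S'
  · simp [hS]
  · simp [hA, hL, hM, hN, hP, hS]

theorem pvFirstChar_toList (a : String) (h : a.toList ≠ []) :
    a.toList = pvFirstChar a :: a.toList.tail := by
  cases htl : a.toList with
  | nil => contradiction
  | cons c t => simp [pvFirstChar, pysem, htl]

theorem pvFirstChar_empty (a : String) (h : a.toList = []) : pvFirstChar a = ' ' := by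
  simp [pvFirstChar, pysem, h]

-- the first character dominates Python's string comparison
theorem pv_le_of_firstChar_lt (a b : String) (h : pvFirstChar a < pvFirstChar b)
    (ha : pvFirstChar a ≠ ' ') (hb : pvFirstChar b ≠ ' ') : a ≤ b := by
  have hna : a.toList ≠ [] := fun hc => ha (pvFirstChar_empty a hc)
  have hnb : b.toList ≠ [] := fun hc => hb (pvFirstChar_empty b hc)
  refine le_of_lt (String.lt_iff_toList_lt.mpr ?_)
  rw [pvFirstChar_toList a hna, pvFirstChar_toList b hnb, List.cons_lt_cons_iff]
  exact Or.inl h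

-- members of the sorted letter box of c have first character c
theorem pv_mem_box (c : Char) (list : List String) (x : String)
    (hx : x ∈ pvMergeSort (list.filter (fun e => pvFirstChar e = c))) : pvFirstChar x = c := by
  have hmem := (pvMergeSort_perm _).mem_iff.mp hx
  simpa using (List.mem_filter.mp hmem).2

-- A's result is pairwise ≤ : each box is sorted and the boxes' letters increase
theorem pvConcat_pairwise (list : List String) :
    (pvMergeSort (list.filter (fun e => pvFirstChar e = 'A')) ++
     pvMergeSort (list.filter (fun e => pvFirstChar e = 'L')) ++
     pvMergeSort (list.filter (fun e => pvFirstChar e = 'M')) ++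
     pvMergeSort (list.filter (fun e => pvFirstChar e = 'N')) ++
     pvMergeSort (list.filter (fun e => pvFirstChar e = 'P')) ++
     pvMergeSort (list.filter (fun e => pvFirstChar e = 'S'))).Pairwise (· ≤ ·) := by
  have hle : ∀ (c1 c2 : Char) (a b : String), c1 < c2 → c1 ≠ ' ' → c2 ≠ ' ' →
      a ∈ pvMergeSort (list.filter (fun e => pvFirstChar e = c1)) →
      b ∈ pvMergeSort (list.filter (fun e => pvFirstChar e = c2)) → a ≤ b := by
    intro c1 c2 a b hc h1 h2 hma hmb
    have ea := pv_mem_box c1 list a hma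
    have eb := pv_mem_box c2 list b hmb
    exact pv_le_of_firstChar_lt a b (by rw [ea, eb]; exact hc) (by rw [ea]; exact h1)
      (by rw [eb]; exact h2)
  simp only [List.pairwise_append, List.mem_append]
  refine ⟨⟨⟨⟨⟨pvMergeSort_pairwise _, pvMergeSort_pairwise _, ?_⟩,
    pvMergeSort_pairwise _, ?_⟩, pvMergeSort_pairwise _, ?_⟩,
    pvMergeSort_pairwise _, ?_⟩, pvMergeSort_pairwise _, ?_⟩ <;>
    intro a ha b hb
  · exact hle 'A' 'L' a b (by decide) (by decide) (by decide) ha hb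
  · rcases ha with ha | ha
    · exact hle 'A' 'M' a b (by decide) (by decide) (by decide) ha hb
    · exact hle 'L' 'M' a b (by decide) (by decide) (by decide) ha hb
  · rcases ha with (ha | ha) | ha
    · exact hle 'A' 'N' a b (by decide) (by decide) (by decide) ha hb
    · exact hle 'L' 'N' a b (by decide) (by decide) (by decide) ha hb
    · exact hle 'M' 'N' a b (by decide) (by decide) (by decide) ha hb
  · rcases ha with ((ha | ha) | ha) | ha
    · exact hle 'A' 'P' a b (by decide) (by decide) (by decide) ha hb
    · exact hle 'L' 'P' a b (by decide) (by decide) (by decide) ha hb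
    · exact hle 'M' 'P' a b (by decide) (by decide) (by decide) ha hb
    · exact hle 'N' 'P' a b (by decide) (by decide) (by decide) ha hb
  · rcases ha with (((ha | ha) | ha) | ha) | ha
    · exact hle 'A' 'S' a b (by decide) (by decide) (by decide) ha hb
    · exact hle 'L' 'S' a b (by decide) (by decide) (by decide) ha hb
    · exact hle 'M' 'S' a b (by decide) (by decide) (by decide) ha hb
    · exact hle 'N' 'S' a b (by decide) (by decide) (by decide) ha hb
    · exact hle 'P' 'S' a b (by decide) (by decide) (by decide) ha hb

-- ===== VERDICT (by name: the statement is the Claim_ definition above) =====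
theorem radixSortForNames_spec : Claim_equal_radixSortForNames := by
  intro list _hdom _hpre
  unfold Spec_radixSortForNames radixSortForNames radixSortForNames_alt
  rw [pvBoxes_eq]
  refine PySem.List.eq_of_perm_of_pairwise_le_of_injective (fun x => x)
    (fun _ _ h => h) ?_ ?_ ?_
  · refine List.Perm.trans ?_ (PySem.List.sorted_perm _ _ _).symm
    exact ((((((pvMergeSort_perm _).append (pvMergeSort_perm _)).append
      (pvMergeSort_perm _)).append (pvMergeSort_perm _)).append
      (pvMergeSort_perm _)).append (pvMergeSort_perm _)).trans (pvBuckets_perm list)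
  · exact pvConcat_pairwise list
  · exact PySem.List.sorted_pairwise _ _
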